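-- pv_equiv track=rewrite | github.com/slash-xin/tablepic | src/tablepic/main.py | generate_table_rec_coord
-- ===== SOURCE A (Python) =====
-- def generate_table_rec_coord(row_num:int, col_num:int, start_pos:list, margin:int=3, cell_width:int=150, cell_height:int=50,
--                            col_width_dict:dict={}, row_height_dict:dict={}, cell_merge_dict:dict={}):
--     """
--     Generate the coordinates of each cell of the table.
--
--     :param row_num: Number of rows in the table.
--     :param col_num: Number of columns in the table.
--     :param start_pos: Starting coordinate of the table in the image.
--     :param margin: Space between cells of the table. Default is 3.
--     :param cell_width: Width of each cell. Default is 150.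
--     :param cell_height: Height of each cell. Default is 50.
--     :param col_width_dict: Specify the width of individual columns. For example,
--         {0: 200} specifies the width of first column as 200. Columns without a specified width use the default width 150.
--     :param row_height_dict: Specify the height of individual rows. For example,
--         {1: 80} specifies the height of second row as 80. Rows without a specified height use the default height 50.
--     :param cell_merge_dict: Information on merging cells. For example,
--         {'0-0': [1,0], '0-1': [0, 2]} indicates that the cell at coordinate [0,0] needs to be merged,
--         by merging 1 row downward and 0 columns to the right (i.e., not merging columns);
--         The cell at coordinate [0,1] needs to be merged, by merging 0 rows downward and 1 column to the right.
--     """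
--     def get_combined_size(index:int, combine_cnt:int, size:int, size_dict:dict, margin:int):
--         combine_size = sum(size_dict.get(idx, size) for idx in range(index, index + combine_cnt + 1)) + margin * combine_cnt
--         return combine_size if combine_cnt > 0 else size_dict.get(index, size)
--
--     def get_start_size(index:int, size:int, margin:int, size_dict:dict):
--         total_size = sum(size_dict.get(i, size) + margin for i in range(index))
--         return total_size if index else 0
--
--     rec_pos_list = []
--     skip_pos_key = []
--     max_x, max_y = 0, 0
--     for i in range(row_num):
--         for j in range(col_num):
--             pos_key = '{}-{}'.format(i, j)
--             if pos_key in skip_pos_key: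
--                 continue
--             x0 = start_pos[0] + get_start_size(j, cell_width, margin, col_width_dict)
--             y0 = start_pos[1] + get_start_size(i, cell_height, margin, row_height_dict)
--             row_combine, col_combine = cell_merge_dict.get(pos_key, [0,0])
--             x1 = x0 + get_combined_size(j, col_combine, cell_width, col_width_dict, margin)
--             y1 = y0 + get_combined_size(i, row_combine, cell_height, row_height_dict, margin)
--             max_x = max(max_x, x1)
--             max_y = max(max_y, y1)
--             rec_pos_list.append([x0, y0, x1, y1])
--             for t_i in range(row_combine):
--                 skip_pos_key.append('{}-{}'.format(i+t_i+1, j))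
--             for t_j in range(col_combine):
--                 skip_pos_key.append('{}-{}'.format(i, j+t_j+1))
--             for t_i in range(row_combine):
--                 for t_j in range(col_combine):
--                     skip_pos_key.append('{}-{}'.format(i+t_i+1, j+t_j+1))
--     table_pos = [start_pos[0]-margin, start_pos[1]-margin, max_x+margin, max_y+margin]
--     return rec_pos_list, table_pos
-- ===== SOURCE B (Python) =====
-- # Faster re-implementation: memoized prefix-sum offset arrays (extended on demand) give
-- # each cell's coordinates in O(1) amortized instead of A's O(row+col) re-summation, and
-- # skipped (merged-away) cell keys are kept in a set instead of a linearly scanned list.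
-- def generate_table_rec_coord(row_num:int, col_num:int, start_pos:list, margin:int=3, cell_width:int=150, cell_height:int=50,
--                            col_width_dict:dict={}, row_height_dict:dict={}, cell_merge_dict:dict={}):
--     def extend_offsets(off, size_dict, default, upto):
--         # ensure off[k] is defined for every k <= upto
--         # (off[k] = total size, margins included, of the k rows/columns before index k)
--         while len(off) <= upto:
--             off.append(off[-1] + size_dict.get(len(off) - 1, default) + margin)
--
--     xoff = [0]
--     yoff = [0]
--     sx, sy = start_pos[0], start_pos[1]
--     rec_pos_list = []
--     skip = set()
--     max_x, max_y = 0, 0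
--     for i in range(row_num):
--         for j in range(col_num):
--             key = '{}-{}'.format(i, j)
--             if key in skip:
--                 continue
--             extend_offsets(xoff, col_width_dict, cell_width, j)
--             extend_offsets(yoff, row_height_dict, cell_height, i)
--             x0 = sx + xoff[j]
--             y0 = sy + yoff[i]
--             rc, cc = cell_merge_dict.get(key, [0, 0])
--             xe = j + max(cc, 0) + 1
--             ye = i + max(rc, 0) + 1
--             extend_offsets(xoff, col_width_dict, cell_width, xe)
--             extend_offsets(yoff, row_height_dict, cell_height, ye)
--             x1 = sx + xoff[xe] - margin
--             y1 = sy + yoff[ye] - margin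
--             max_x = max(max_x, x1)
--             max_y = max(max_y, y1)
--             rec_pos_list.append([x0, y0, x1, y1])
--             for a in range(max(rc, 0) + 1):
--                 for b in range(max(cc, 0) + 1):
--                     if a or b:
--                         skip.add('{}-{}'.format(i + a, j + b))
--     table_pos = [sx - margin, sy - margin, max_x + margin, max_y + margin]
--     return rec_pos_list, table_pos
-- ===== Notes on version B (the rewrite author's own statement) =====
-- stated objective: faster
-- what changed: B maintains memoized prefix-sum offset tables for column x-positions and row y-positions, extended on demand (so each cell's coordinates are O(1) amortized lookups instead of A's O(row+col) re-summation of dict.get ranges), replaces A's three skip-key append loops by one double loop over the merged block, and keeps skip keys in a set instead of a list scanned linearly.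
import Mathlib
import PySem

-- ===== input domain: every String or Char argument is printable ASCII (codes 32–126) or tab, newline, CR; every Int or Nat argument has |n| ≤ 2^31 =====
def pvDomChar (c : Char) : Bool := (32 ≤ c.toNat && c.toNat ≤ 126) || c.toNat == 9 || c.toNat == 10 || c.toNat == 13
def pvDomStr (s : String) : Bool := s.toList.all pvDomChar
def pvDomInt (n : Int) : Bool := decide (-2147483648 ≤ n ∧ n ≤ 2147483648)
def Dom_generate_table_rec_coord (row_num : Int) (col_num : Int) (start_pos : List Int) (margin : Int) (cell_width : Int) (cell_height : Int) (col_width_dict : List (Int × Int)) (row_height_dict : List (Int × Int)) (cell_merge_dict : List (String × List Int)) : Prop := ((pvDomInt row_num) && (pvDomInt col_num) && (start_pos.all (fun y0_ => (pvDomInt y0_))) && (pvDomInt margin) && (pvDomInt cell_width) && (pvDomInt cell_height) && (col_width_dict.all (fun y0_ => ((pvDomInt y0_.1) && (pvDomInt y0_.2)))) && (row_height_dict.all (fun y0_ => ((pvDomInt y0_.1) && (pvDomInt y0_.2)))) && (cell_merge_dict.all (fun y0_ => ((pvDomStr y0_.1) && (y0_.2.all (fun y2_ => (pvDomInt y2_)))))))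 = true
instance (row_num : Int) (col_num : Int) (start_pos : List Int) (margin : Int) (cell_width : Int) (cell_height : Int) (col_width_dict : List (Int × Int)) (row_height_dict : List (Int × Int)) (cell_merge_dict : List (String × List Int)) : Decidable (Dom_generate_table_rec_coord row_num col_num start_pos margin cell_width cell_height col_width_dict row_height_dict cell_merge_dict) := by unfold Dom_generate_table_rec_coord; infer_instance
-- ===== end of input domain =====

-- B replaces A's per-cell O(row+col) re-summation of column widths / row heights by
-- memoized prefix-sum offset tables extended on demand (O(1) amortized per cell), and
-- keeps skipped (merged-away) cell keys in a set.

-- ===== PORT A =====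
-- '{}-{}'.format(i, j)  (the cell-key format, used identically by both Pythons)
def pvFmt (i j : Int) : String := PySem.Int.toStr i ++ "-" ++ PySem.Int.toStr j

-- A's inner helper get_combined_size
def pvGetCombinedSize (index combine_cnt size : Int) (size_dict : PySem.Dict Int Int) (margin : Int) : Int :=
  let combine_size := ((PySem.List.pyRange index (index + combine_cnt + 1)).map (fun idx => size_dict.getD idx size)).sum + margin * combine_cnt
  if combine_cnt > 0 then combine_size else size_dict.getD index size

-- A's inner helper get_start_size  ('total_size if index else 0')
def pvGetStartSize (index size margin : Int) (size_dict : PySem.Dict Int Int) : Int :=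
  let total_size := ((PySem.List.pyRange 0 index).map (fun i => size_dict.getD i size + margin)).sum
  if index = 0 then 0 else total_size

-- body of A's inner 'for j in range(col_num)' loop.  start_pos[0]/start_pos[1] raise
-- IndexError on short lists (excluded by Pre_); pyGetD is exact wherever A returns.
-- Unpacking of a merge value ported as pyGetD 0 / pyGetD 1: exact on length-2 values
-- (Pre_ excludes the others).
def pvStepA (start_pos : List Int) (margin cell_width cell_height : Int)
    (col_width_dict row_height_dict : List (Int × Int)) (cell_merge_dict : List (String × List Int))
    (i : Int) (st : List (List Int) × List String × Int × Int) (j : Int) :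
    List (List Int) × List String × Int × Int :=
  match st with
  | (rec_pos_list, skip_pos_key, max_x, max_y) =>
    let pos_key := pvFmt i j
    if pos_key ∈ skip_pos_key then (rec_pos_list, skip_pos_key, max_x, max_y)
    else
      let x0 := PySem.List.pyGetD start_pos 0 0 + pvGetStartSize j cell_width margin (PySem.Dict.mk col_width_dict)
      let y0 := PySem.List.pyGetD start_pos 1 0 + pvGetStartSize i cell_height margin (PySem.Dict.mk row_height_dict)
      let rcc := PySem.Dict.getD (PySem.Dict.mk cell_merge_dict) pos_key [0, 0]
      let row_combine := PySem.List.pyGetD rcc 0 0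
      let col_combine := PySem.List.pyGetD rcc 1 0
      let x1 := x0 + pvGetCombinedSize j col_combine cell_width (PySem.Dict.mk col_width_dict) margin
      let y1 := y0 + pvGetCombinedSize i row_combine cell_height (PySem.Dict.mk row_height_dict) margin
      let max_x := max max_x x1
      let max_y := max max_y y1
      let rec_pos_list := rec_pos_list ++ [[x0, y0, x1, y1]]
      let skip_pos_key := ((skip_pos_key
        ++ (PySem.List.pyRange 0 row_combine).map (fun t_i => pvFmt (i + t_i + 1) j))
        ++ (PySem.List.pyRange 0 col_combine).map (fun t_j => pvFmt i (j + t_j + 1)))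
        ++ (PySem.List.pyRange 0 row_combine).flatMap (fun t_i =>
             (PySem.List.pyRange 0 col_combine).map (fun t_j => pvFmt (i + t_i + 1) (j + t_j + 1)))
      (rec_pos_list, skip_pos_key, max_x, max_y)

def generate_table_rec_coord (row_num : Int) (col_num : Int) (start_pos : List Int) (margin : Int) (cell_width : Int) (cell_height : Int) (col_width_dict : List (Int × Int)) (row_height_dict : List (Int × Int)) (cell_merge_dict : List (String × List Int)) : List (List Int) × List Int :=
  let st := (PySem.List.pyRange 0 row_num).foldl (fun st i =>
      (PySem.List.pyRange 0 col_num).foldl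
        (pvStepA start_pos margin cell_width cell_height col_width_dict row_height_dict cell_merge_dict i) st)
    (([] : List (List Int)), ([] : List String), (0 : Int), (0 : Int))
  (st.1, [PySem.List.pyGetD start_pos 0 0 - margin, PySem.List.pyGetD start_pos 1 0 - margin, st.2.2.1 + margin, st.2.2.2 + margin])

-- ===== PORT B =====
-- Source B's inner helper extend_offsets (off is threaded instead of mutated in place)
def pvExt (size_dict : PySem.Dict Int Int) (dflt margin : Int) (off : List Int) (upto : Int) : List Int :=
  if h : PySem.List.len off ≤ upto then
    pvExt size_dict dflt margin
      (off ++ [PySem.List.pyGetD off (-1) 0 + size_dict.getD (PySem.List.len off - 1) dflt + margin]) upto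
  else off
termination_by (upto + 1 - (off.length : Int)).toNat
decreasing_by simp only [List.length_append, List.length_cons, List.length_nil, PySem.List.len_eq] at *; omega

-- body of Source B's inner 'for j in range(col_num)' loop (literal transliteration; the
-- mutated offset lists are part of the fold state; list indexing by pyGetD, exact
-- wherever Source B returns)
def pvStepB (sx sy margin cell_width cell_height : Int)
    (col_width_dict row_height_dict : List (Int × Int)) (cell_merge_dict : List (String × List Int))
    (i : Int) (st : List (List Int) × PySem.Set String × Int × Int × List Int × List Int) (j : Int) :
    List (List Int) × PySem.Set String × Int × Int × List Int × List Int :=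
  match st with
  | (rec_pos_list, skip, max_x, max_y, xoff, yoff) =>
    let key := pvFmt i j
    if key ∈ skip then (rec_pos_list, skip, max_x, max_y, xoff, yoff)
    else
      let xoff := pvExt (PySem.Dict.mk col_width_dict) cell_width margin xoff j
      let yoff := pvExt (PySem.Dict.mk row_height_dict) cell_height margin yoff i
      let x0 := sx + PySem.List.pyGetD xoff j 0
      let y0 := sy + PySem.List.pyGetD yoff i 0
      let rcc := PySem.Dict.getD (PySem.Dict.mk cell_merge_dict) key [0, 0]
      let rc := PySem.List.pyGetD rcc 0 0
      let cc := PySem.List.pyGetD rcc 1 0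
      let xe := j + max cc 0 + 1
      let ye := i + max rc 0 + 1
      let xoff := pvExt (PySem.Dict.mk col_width_dict) cell_width margin xoff xe
      let yoff := pvExt (PySem.Dict.mk row_height_dict) cell_height margin yoff ye
      let x1 := sx + PySem.List.pyGetD xoff xe 0 - margin
      let y1 := sy + PySem.List.pyGetD yoff ye 0 - margin
      let max_x := max max_x x1
      let max_y := max max_y y1
      let rec_pos_list := rec_pos_list ++ [[x0, y0, x1, y1]]
      let skip := (PySem.List.pyRange 0 (max rc 0 + 1)).foldl (fun sk a =>
        (PySem.List.pyRange 0 (max cc 0 + 1)).foldl (fun sk b =>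
          if a ≠ 0 ∨ b ≠ 0 then PySem.Set.add sk (pvFmt (i + a) (j + b)) else sk) sk) skip
      (rec_pos_list, skip, max_x, max_y, xoff, yoff)

def generate_table_rec_coord_alt (row_num : Int) (col_num : Int) (start_pos : List Int) (margin : Int) (cell_width : Int) (cell_height : Int) (col_width_dict : List (Int × Int)) (row_height_dict : List (Int × Int)) (cell_merge_dict : List (String × List Int)) : List (List Int) × List Int :=
  let sx := PySem.List.pyGetD start_pos 0 0
  let sy := PySem.List.pyGetD start_pos 1 0
  let st := (PySem.List.pyRange 0 row_num).foldl (fun st i =>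
      (PySem.List.pyRange 0 col_num).foldl
        (pvStepB sx sy margin cell_width cell_height col_width_dict row_height_dict cell_merge_dict i) st)
    (([] : List (List Int)), (PySem.Set.empty : PySem.Set String), (0 : Int), (0 : Int), [(0 : Int)], [(0 : Int)])
  (st.1, [sx - margin, sy - margin, st.2.2.1 + margin, st.2.2.2.1 + margin])

-- ===== PRECONDITION & SPEC =====
-- decimal value of a digit string (used only to recognise cell keys "i-j")
def pvDigitsVal (cs : List Char) : Int :=
  cs.foldl (fun a c => a * 10 + ((c.toNat : Int) - 48)) 0

-- does s name a grid cell, i.e. s = '{i}-{j}' for some 0 ≤ i < row, 0 ≤ j < col?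
def pvIsGridKey (row col : Int) (s : String) : Bool :=
  (PySem.List.pyRange 0 (s.toList.length : Int)).any (fun k =>
    decide (0 ≤ pvDigitsVal (s.toList.take k.toNat)) &&
    decide (pvDigitsVal (s.toList.take k.toNat) < row) &&
    decide (0 ≤ pvDigitsVal (s.toList.drop (k.toNat + 1))) &&
    decide (pvDigitsVal (s.toList.drop (k.toNat + 1)) < col) &&
    decide (s.toList = PySem.Int.toChars (pvDigitsVal (s.toList.take k.toNat)) ++
      '-' :: PySem.Int.toChars (pvDigitsVal (s.toList.drop (k.toNat + 1)))))

-- Pre_ excludes start positions with fewer than two coordinates (A raises IndexError)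
-- and merge entries keyed by a grid cell whose value is not a length-2 list: A raises
-- ValueError/IndexError on unpacking such a value when that cell is visited (A still
-- returns if the cell was swallowed by an earlier merge, where B agrees with A anyway).
def Pre_generate_table_rec_coord (row_num : Int) (col_num : Int) (start_pos : List Int) (margin : Int) (cell_width : Int) (cell_height : Int) (col_width_dict : List (Int × Int)) (row_height_dict : List (Int × Int)) (cell_merge_dict : List (String × List Int)) : Prop :=
  2 ≤ start_pos.length ∧ ∀ p ∈ cell_merge_dict,
    pvIsGridKey row_num col_num p.1 = true → p.2.length = 2
instance (row_num : Int) (col_num : Int) (start_pos : List Int) (margin : Int) (cell_width : Int) (cell_height : Int) (col_width_dict : List (Int × Int)) (row_height_dict : List (Int × Int)) (cell_merge_dict : List (String × List Int)) : Decidable (Pre_generate_table_rec_coord row_num col_num start_pos margin cell_width cell_height col_width_dict row_height_dict cell_merge_dict) := by unfold Pre_generate_table_rec_coord; infer_instance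

def pvWitness_generate_table_rec_coord : Int × Int × List Int × Int × Int × Int × (List (Int × Int)) × (List (Int × Int)) × (List (String × List Int)) :=
  (2, 3, [10, 20], 3, 150, 50, [(0, 200)], [(1, 80)], [("0-0", [1, 0]), ("0-1", [0, 1])])

def Spec_generate_table_rec_coord (row_num : Int) (col_num : Int) (start_pos : List Int) (margin : Int) (cell_width : Int) (cell_height : Int) (col_width_dict : List (Int × Int)) (row_height_dict : List (Int × Int)) (cell_merge_dict : List (String × List Int)) (out : List (List Int) × List Int) : Prop := out = generate_table_rec_coord_alt row_num col_num start_pos margin cell_width cell_height col_width_dict row_height_dict cell_merge_dict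
instance (row_num : Int) (col_num : Int) (start_pos : List Int) (margin : Int) (cell_width : Int) (cell_height : Int) (col_width_dict : List (Int × Int)) (row_height_dict : List (Int × Int)) (cell_merge_dict : List (String × List Int)) (out : List (List Int) × List Int) : Decidable (Spec_generate_table_rec_coord row_num col_num start_pos margin cell_width cell_height col_width_dict row_height_dict cell_merge_dict out) := by unfold Spec_generate_table_rec_coord; infer_instance

-- ===== CLAIM (what is proved, stated in full; the proofs are below) =====
def Claim_equal_generate_table_rec_coord : Prop := ∀ (row_num : Int) (col_num : Int) (start_pos : List Int) (margin : Int) (cell_width : Int) (cell_height : Int) (col_width_dict : List (Int × Int)) (row_height_dict : List (Int × Int)) (cell_merge_dict : List (String × List Int)), Dom_generate_table_rec_coord row_num col_num start_pos margin cell_width cell_height col_width_dict row_height_dict cell_merge_dict → Pre_generate_table_rec_coord row_num col_num start_pos margin cell_width cell_height col_width_dict row_height_dict cell_merge_dict → Spec_generate_table_rec_coord row_num col_num start_pos margin cell_width cell_height col_width_dict row_height_dict cell_merge_dict (generate_table_rec_coord row_num col_num start_pos margin cell_width cell_height col_width_dict row_height_dict cell_merge_dict)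

-- ===== LEMMAS AND PROOFS =====

-- prefix offset: total size (with margins) of the first k rows/columns
def pvOff (d : PySem.Dict Int Int) (s m k : Int) : Int :=
  ((PySem.List.pyRange 0 k).map (fun t => d.getD t s + m)).sum

lemma pvOff_nonpos (d : PySem.Dict Int Int) (s m k : Int) (h : k ≤ 0) : pvOff d s m k = 0 := by
  simp [pvOff, PySem.List.pyRange_one_eq_nil h]

lemma pvOff_succ (d : PySem.Dict Int Int) (s m k : Int) (h : 0 ≤ k) :
    pvOff d s m (k + 1) = pvOff d s m k + (d.getD k s + m) := by
  simp [pvOff, PySem.List.pyRange_one_succ_right h]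

lemma pvStartSize_eq (k s m : Int) (d : PySem.Dict Int Int) :
    pvGetStartSize k s m d = pvOff d s m k := by
  by_cases hk : k = 0
  · subst hk; simp [pvGetStartSize, pvOff_nonpos d s m 0 le_rfl]
  · simp [pvGetStartSize, hk, pvOff]

lemma pvCombined_eq (k c s m : Int) (d : PySem.Dict Int Int) (hk : 0 ≤ k) :
    pvGetCombinedSize k c s d m = pvOff d s m (k + max c 0 + 1) - pvOff d s m k - m := by
  by_cases hc : c > 0
  · have hmax : max c 0 = c := by omega
    rw [pvGetCombinedSize, hmax]
    simp only [hc, if_pos]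
    have hsplit : PySem.List.pyRange 0 (k + c + 1) = PySem.List.pyRange 0 k ++ PySem.List.pyRange k (k + c + 1) :=
      PySem.List.pyRange_one_append 0 k (k + c + 1) hk (by omega)
    rw [pvOff, pvOff, hsplit, List.map_append, List.sum_append]
    rw [PySem.List.sum_map_add_int (PySem.List.pyRange k (k + c + 1)) (fun t => d.getD t s) (fun _ => m)]
    rw [PySem.List.sum_map_const_int, PySem.List.length_pyRange_one]
    have : ((k + c + 1 - k).toNat : Int) = c + 1 := by omega
    rw [this]; ring
  · have hmax : max c 0 = 0 := by omega
    rw [pvGetCombinedSize, hmax]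
    simp only [hc, if_false]
    rw [show k + 0 + 1 = k + 1 by ring, pvOff_succ d s m k hk]
    ring

-- membership in a guarded set-building fold
lemma pvMemFold {γ : Type} (l : List γ) (p : γ → Prop) [DecidablePred p] (f : γ → String) :
    ∀ (s0 : PySem.Set String) (y : String),
      (y ∈ l.foldl (fun s x => if p x then PySem.Set.add s (f x) else s) s0) ↔
        y ∈ s0 ∨ ∃ x ∈ l, p x ∧ y = f x := by
  induction l with
  | nil => simp
  | cons c t ih =>
      intro s0 y
      simp only [List.foldl_cons, List.mem_cons]
      rw [ih]
      by_cases hp : p c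
      · simp only [hp, if_pos, PySem.Set.mem_add]
        constructor
        · rintro (h | h)
          · rcases h with h | h
            · exact Or.inl h
            · exact Or.inr ⟨c, Or.inl rfl, hp, h⟩
          · obtain ⟨x, hx, hpx, rfl⟩ := h
            exact Or.inr ⟨x, Or.inr hx, hpx, rfl⟩
        · rintro (h | ⟨x, hx | hx, hpx, rfl⟩)
          · exact Or.inl (Or.inl h)
          · subst hx; exact Or.inl (Or.inr rfl)
          · exact Or.inr ⟨x, hx, hpx, rfl⟩
      · simp only [hp, if_false]
        constructor
        · rintro (h | ⟨x, hx, hpx, rfl⟩)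
          · exact Or.inl h
          · exact Or.inr ⟨x, Or.inr hx, hpx, rfl⟩
        · rintro (h | ⟨x, hx | hx, hpx, rfl⟩)
          · exact Or.inl h
          · subst hx; exact absurd hpx hp
          · exact Or.inr ⟨x, hx, hpx, rfl⟩

lemma pvMemFold2 (la lb : List Int) (p : Int → Int → Prop) [∀ a b, Decidable (p a b)]
    (f : Int → Int → String) :
    ∀ (s0 : PySem.Set String) (y : String),
      (y ∈ la.foldl (fun s a => lb.foldl (fun s b => if p a b then PySem.Set.add s (f a b) else s) s) s0) ↔
        y ∈ s0 ∨ ∃ a ∈ la, ∃ b ∈ lb, p a b ∧ y = f a b := by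
  induction la with
  | nil => simp
  | cons c t ih =>
      intro s0 y
      simp only [List.foldl_cons, List.mem_cons]
      rw [ih, pvMemFold lb (p c) (f c)]
      constructor
      · rintro ((h | ⟨b, hb, hpb, rfl⟩) | ⟨a, ha, b, hb, hp', rfl⟩)
        · exact Or.inl h
        · exact Or.inr ⟨c, Or.inl rfl, b, hb, hpb, rfl⟩
        · exact Or.inr ⟨a, Or.inr ha, b, hb, hp', rfl⟩
      · rintro (h | ⟨a, ha | ha, b, hb, hp', rfl⟩)
        · exact Or.inl (Or.inl h)
        · subst ha; exact Or.inl (Or.inr ⟨b, hb, hp', rfl⟩)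
        · exact Or.inr ⟨a, ha, b, hb, hp', rfl⟩

-- the state relation between the two loops: equal rectangles and maxima,
-- membership-equal skip collections, and B's offset lists are valid prefix tables
def pvR (cwd rhd : PySem.Dict Int Int) (cw ch margin : Int)
    (sa : List (List Int) × List String × Int × Int)
    (sb : List (List Int) × PySem.Set String × Int × Int × List Int × List Int) : Prop :=
  sa.1 = sb.1 ∧ sa.2.2.1 = sb.2.2.1 ∧ sa.2.2.2 = sb.2.2.2.1 ∧ (∀ y, y ∈ sa.2.1 ↔ y ∈ sb.2.1) ∧
  (∃ m : Int, 1 ≤ m ∧ sb.2.2.2.2.1 = (PySem.List.pyRange 0 m).map (pvOff cwd cw margin)) ∧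
  (∃ m : Int, 1 ≤ m ∧ sb.2.2.2.2.2 = (PySem.List.pyRange 0 m).map (pvOff rhd ch margin))

-- pvExt turns a valid prefix table into a valid prefix table covering index upto
lemma pvExt_good (d : PySem.Dict Int Int) (dflt mg : Int) :
    ∀ (N : Nat) (off : List Int) (m upto : Int), 1 ≤ m →
      off = (PySem.List.pyRange 0 m).map (pvOff d dflt mg) →
      (upto + 1 - m).toNat ≤ N →
      pvExt d dflt mg off upto = (PySem.List.pyRange 0 (max m (upto + 1))).map (pvOff d dflt mg) := by
  intro N
  induction N with
  | zero =>
      intro off m upto hm hoff hfuel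
      have hlen : (off.length : Int) = m := by
        rw [hoff]; simp [PySem.List.length_pyRange_one]; omega
      rw [pvExt, dif_neg (by simp only [PySem.List.len_eq]; omega)]
      rw [show max m (upto + 1) = m by omega, hoff]
  | succ N ih =>
      intro off m upto hm hoff hfuel
      have hlen : (off.length : Int) = m := by
        rw [hoff]; simp [PySem.List.length_pyRange_one]; omega
      by_cases hc : m ≤ upto
      · rw [pvExt, dif_pos (by simp only [PySem.List.len_eq]; omega)]
        have hsplit : PySem.List.pyRange 0 m = PySem.List.pyRange 0 (m - 1) ++ [m - 1] := by
          have hh := PySem.List.pyRange_one_succ_right (show (0:Int) ≤ m - 1 by omega)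
          rw [show m - 1 + 1 = m by ring] at hh
          exact hh
        have hlast : PySem.List.pyGetD off (-1) 0 = pvOff d dflt mg (m - 1) := by
          rw [hoff, hsplit, List.map_append]
          exact PySem.List.pyGetD_neg_one_append_singleton _ _ _
        have hnew : off ++ [PySem.List.pyGetD off (-1) 0 + d.getD (PySem.List.len off - 1) dflt + mg]
            = (PySem.List.pyRange 0 (m + 1)).map (pvOff d dflt mg) := by
          rw [hlast, PySem.List.len_eq, hlen, hoff,
            PySem.List.pyRange_one_succ_right (by omega : (0:Int) ≤ m), List.map_append]
          congr 1
          simp only [List.map_cons, List.map_nil, List.cons.injEq, and_true]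
          rw [show m = (m - 1) + 1 by ring, pvOff_succ d dflt mg (m - 1) (by omega)]
          ring_nf
        rw [hnew] at *
        rw [ih _ (m + 1) upto (by omega) rfl (by omega)]
        rw [show max (m + 1) (upto + 1) = max m (upto + 1) by omega]
      · rw [pvExt, dif_neg (by simp only [PySem.List.len_eq]; omega)]
        rw [show max m (upto + 1) = m by omega, hoff]

-- generic two-fold relation
lemma pvFoldlRel {α β γ : Type} (R : α → β → Prop) (f : α → γ → α) (g : β → γ → β) :
    ∀ (l : List γ) (a : α) (b : β), R a b →
      (∀ c ∈ l, ∀ a b, R a b → R (f a c) (g b c)) → R (l.foldl f a) (l.foldl g b) := by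
  intro l
  induction l with
  | nil => intro a b h _; exact h
  | cons c t ih =>
      intro a b h hs
      exact ih _ _ (hs c (by simp) a b h) (fun c' hc' => hs c' (by simp [hc']))

-- one cell: the two step functions preserve pvR
lemma pv_step_rel (start_pos : List Int) (margin cw ch sx sy : Int)
    (cwdl rhdl : List (Int × Int)) (cmdl : List (String × List Int))
    (hsx : sx = PySem.List.pyGetD start_pos 0 0) (hsy : sy = PySem.List.pyGetD start_pos 1 0)
    (i j : Int) (hi0 : 0 ≤ i) (hj0 : 0 ≤ j)
    (sa : List (List Int) × List String × Int × Int)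
    (sb : List (List Int) × PySem.Set String × Int × Int × List Int × List Int)
    (h : pvR (PySem.Dict.mk cwdl) (PySem.Dict.mk rhdl) cw ch margin sa sb) :
    pvR (PySem.Dict.mk cwdl) (PySem.Dict.mk rhdl) cw ch margin
        (pvStepA start_pos margin cw ch cwdl rhdl cmdl i sa j)
        (pvStepB sx sy margin cw ch cwdl rhdl cmdl i sb j) := by
  rcases sa with ⟨ra, ka, xa, ya⟩
  rcases sb with ⟨rb, kb, xb, yb, xoffb, yoffb⟩
  obtain ⟨h1, h2, h3, h4, ⟨mX, hmX, hxoff⟩, ⟨mY, hmY, hyoff⟩⟩ := h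
  dsimp only at h1 h2 h3 h4 hxoff hyoff
  unfold pvStepA pvStepB
  dsimp only
  by_cases hmem : pvFmt i j ∈ ka
  · rw [if_pos hmem, if_pos ((h4 _).mp hmem)]
    exact ⟨h1, h2, h3, h4, ⟨mX, hmX, hxoff⟩, ⟨mY, hmY, hyoff⟩⟩
  · rw [if_neg hmem, if_neg (fun hh => hmem ((h4 _).mpr hh))]
    set cc := PySem.List.pyGetD (PySem.Dict.getD (PySem.Dict.mk cmdl) (pvFmt i j) [0, 0]) 1 0 with hccdef
    set rc := PySem.List.pyGetD (PySem.Dict.getD (PySem.Dict.mk cmdl) (pvFmt i j) [0, 0]) 0 0 with hrcdef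
    -- the two offset-table extensions on each axis
    have hx1 : pvExt (PySem.Dict.mk cwdl) cw margin xoffb j
        = (PySem.List.pyRange 0 (max mX (j + 1))).map (pvOff (PySem.Dict.mk cwdl) cw margin) :=
      pvExt_good _ _ _ ((j + 1 - mX).toNat) xoffb mX j hmX hxoff le_rfl
    have hx2 : pvExt (PySem.Dict.mk cwdl) cw margin (pvExt (PySem.Dict.mk cwdl) cw margin xoffb j) (j + max cc 0 + 1)
        = (PySem.List.pyRange 0 (max (max mX (j + 1)) (j + max cc 0 + 1 + 1))).map (pvOff (PySem.Dict.mk cwdl) cw margin) :=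
      pvExt_good _ _ _ _ _ (max mX (j + 1)) _ (by omega) hx1 le_rfl
    have hy1 : pvExt (PySem.Dict.mk rhdl) ch margin yoffb i
        = (PySem.List.pyRange 0 (max mY (i + 1))).map (pvOff (PySem.Dict.mk rhdl) ch margin) :=
      pvExt_good _ _ _ ((i + 1 - mY).toNat) yoffb mY i hmY hyoff le_rfl
    have hy2 : pvExt (PySem.Dict.mk rhdl) ch margin (pvExt (PySem.Dict.mk rhdl) ch margin yoffb i) (i + max rc 0 + 1)
        = (PySem.List.pyRange 0 (max (max mY (i + 1)) (i + max rc 0 + 1 + 1))).map (pvOff (PySem.Dict.mk rhdl) ch margin) :=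
      pvExt_good _ _ _ _ _ (max mY (i + 1)) _ (by omega) hy1 le_rfl
    -- the coordinate equalities
    have ex0 : PySem.List.pyGetD start_pos 0 0 + pvGetStartSize j cw margin (PySem.Dict.mk cwdl)
        = sx + PySem.List.pyGetD (pvExt (PySem.Dict.mk cwdl) cw margin xoffb j) j 0 := by
      rw [hsx, pvStartSize_eq, hx1,
        PySem.List.pyGetD_map_pyRange_of_nonneg _ _ j 0 hj0 (by omega)]
    have ey0 : PySem.List.pyGetD start_pos 1 0 + pvGetStartSize i ch margin (PySem.Dict.mk rhdl)
        = sy + PySem.List.pyGetD (pvExt (PySem.Dict.mk rhdl) ch margin yoffb i) i 0 := by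
      rw [hsy, pvStartSize_eq, hy1,
        PySem.List.pyGetD_map_pyRange_of_nonneg _ _ i 0 hi0 (by omega)]
    have ex1 : PySem.List.pyGetD start_pos 0 0 + pvGetStartSize j cw margin (PySem.Dict.mk cwdl)
          + pvGetCombinedSize j cc cw (PySem.Dict.mk cwdl) margin
        = sx + PySem.List.pyGetD (pvExt (PySem.Dict.mk cwdl) cw margin (pvExt (PySem.Dict.mk cwdl) cw margin xoffb j) (j + max cc 0 + 1)) (j + max cc 0 + 1) 0 - margin := by
      rw [pvStartSize_eq, pvCombined_eq j cc cw margin _ hj0, hsx, hx2,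
        PySem.List.pyGetD_map_pyRange_of_nonneg _ _ (j + max cc 0 + 1) 0 (by omega) (by omega)]
      ring
    have ey1 : PySem.List.pyGetD start_pos 1 0 + pvGetStartSize i ch margin (PySem.Dict.mk rhdl)
          + pvGetCombinedSize i rc ch (PySem.Dict.mk rhdl) margin
        = sy + PySem.List.pyGetD (pvExt (PySem.Dict.mk rhdl) ch margin (pvExt (PySem.Dict.mk rhdl) ch margin yoffb i) (i + max rc 0 + 1)) (i + max rc 0 + 1) 0 - margin := by
      rw [pvStartSize_eq, pvCombined_eq i rc ch margin _ hi0, hsy, hy2,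
        PySem.List.pyGetD_map_pyRange_of_nonneg _ _ (i + max rc 0 + 1) 0 (by omega) (by omega)]
      ring
    refine ⟨?_, ?_, ?_, ?_, ?_, ?_⟩
    · dsimp only
      rw [h1, ex1, ey1, ex0, ey0]
    · dsimp only
      rw [h2, ex1]
    · dsimp only
      rw [h3, ey1]
    · dsimp only
      intro y
      rw [pvMemFold2 (PySem.List.pyRange 0 (max rc 0 + 1)) (PySem.List.pyRange 0 (max cc 0 + 1))
        (fun a b => a ≠ 0 ∨ b ≠ 0) (fun a b => pvFmt (i + a) (j + b)) kb y]
      simp only [List.mem_append, List.mem_map, List.mem_flatMap, PySem.List.mem_pyRange_one]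
      constructor
      · rintro (((hmem' | ⟨t, ⟨ht0, ht1⟩, hfe⟩) | ⟨t, ⟨ht0, ht1⟩, hfe⟩) | ⟨ti, ⟨hti0, hti1⟩, tj, ⟨htj0, htj1⟩, hfe⟩)
        · exact Or.inl ((h4 y).mp hmem')
        · subst hfe
          exact Or.inr ⟨t + 1, ⟨by omega, by omega⟩, 0, ⟨by omega, by omega⟩, Or.inl (by omega),
            by congr 1 <;> omega⟩
        · subst hfe
          exact Or.inr ⟨0, ⟨by omega, by omega⟩, t + 1, ⟨by omega, by omega⟩, Or.inr (by omega),
            by congr 1 <;> omega⟩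
        · subst hfe
          exact Or.inr ⟨ti + 1, ⟨by omega, by omega⟩, tj + 1, ⟨by omega, by omega⟩, Or.inl (by omega),
            by congr 1 <;> omega⟩
      · rintro (hmem' | ⟨a, ⟨ha0, ha1⟩, b, ⟨hb0, hb1⟩, hab, hfe⟩)
        · exact Or.inl (Or.inl (Or.inl ((h4 y).mpr hmem')))
        · rcases eq_or_ne a 0 with rfl | ha
          · have hb : b ≠ 0 := hab.resolve_left (fun h' => h' rfl)
            subst hfe
            exact Or.inl (Or.inr ⟨b - 1, ⟨by omega, by omega⟩, by congr 1 <;> omega⟩)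
          · rcases eq_or_ne b 0 with rfl | hb
            · subst hfe
              exact Or.inl (Or.inl (Or.inr ⟨a - 1, ⟨by omega, by omega⟩, by congr 1 <;> omega⟩))
            · subst hfe
              exact Or.inr ⟨a - 1, ⟨by omega, by omega⟩, b - 1, ⟨by omega, by omega⟩,
                by congr 1 <;> omega⟩
    · exact ⟨max (max mX (j + 1)) (j + max cc 0 + 1 + 1), by omega, hx2⟩
    · exact ⟨max (max mY (i + 1)) (i + max rc 0 + 1 + 1), by omega, hy2⟩

lemma pv_finish (cwd rhd : PySem.Dict Int Int) (cw ch m u v : Int)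
    (sa : List (List Int) × List String × Int × Int)
    (sb : List (List Int) × PySem.Set String × Int × Int × List Int × List Int)
    (h : pvR cwd rhd cw ch m sa sb) :
    ((sa.1, [u, v, sa.2.2.1 + m, sa.2.2.2 + m]) : List (List Int) × List Int)
      = (sb.1, [u, v, sb.2.2.1 + m, sb.2.2.2.1 + m]) := by
  obtain ⟨h1, h2, h3, _⟩ := h
  rw [h1, h2, h3]

theorem pv_main (row_num col_num : Int) (start_pos : List Int) (margin cell_width cell_height : Int)
    (col_width_dict row_height_dict : List (Int × Int)) (cell_merge_dict : List (String × List Int)) :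
    generate_table_rec_coord row_num col_num start_pos margin cell_width cell_height col_width_dict row_height_dict cell_merge_dict
      = generate_table_rec_coord_alt row_num col_num start_pos margin cell_width cell_height col_width_dict row_height_dict cell_merge_dict := by
  simp only [generate_table_rec_coord, generate_table_rec_coord_alt]
  apply pv_finish (PySem.Dict.mk col_width_dict) (PySem.Dict.mk row_height_dict) cell_width cell_height
  have hinit1 : [(0 : Int)] = (PySem.List.pyRange 0 1).map (pvOff (PySem.Dict.mk col_width_dict) cell_width margin) := by
    rw [show PySem.List.pyRange (0:Int) 1 = [0] from by decide]
    simp [pvOff_nonpos _ _ _ 0 le_rfl]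
  have hinit2 : [(0 : Int)] = (PySem.List.pyRange 0 1).map (pvOff (PySem.Dict.mk row_height_dict) cell_height margin) := by
    rw [show PySem.List.pyRange (0:Int) 1 = [0] from by decide]
    simp [pvOff_nonpos _ _ _ 0 le_rfl]
  refine pvFoldlRel (pvR (PySem.Dict.mk col_width_dict) (PySem.Dict.mk row_height_dict) cell_width cell_height margin) _ _ _ _ _
    ⟨rfl, rfl, rfl, fun _ => Iff.rfl, ⟨1, le_refl 1, hinit1⟩, ⟨1, le_refl 1, hinit2⟩⟩ ?_
  intro i hi sa sb hab
  refine pvFoldlRel (pvR (PySem.Dict.mk col_width_dict) (PySem.Dict.mk row_height_dict) cell_width cell_height margin) _ _ _ _ _ hab ?_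
  intro j hj sa' sb' hab'
  rw [PySem.List.mem_pyRange_one] at hi hj
  exact pv_step_rel start_pos margin cell_width cell_height _ _
    col_width_dict row_height_dict cell_merge_dict rfl rfl i j hi.1 hj.1 sa' sb' hab'

-- ===== VERDICT (by name: the statement is the Claim_ definition above) =====
theorem generate_table_rec_coord_spec : Claim_equal_generate_table_rec_coord := by
  intro row_num col_num start_pos margin cell_width cell_height cwd rhd cmd _ _
  unfold Spec_generate_table_rec_coord
  exact pv_main _ _ _ _ _ _ _ _ _
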